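-- pv_equiv track=rewrite | github.com/mmveres/pythonProject18_09_2021 | lesson03/task_list/list_task.py | get_list_odd_value_task01_v5
-- ===== SOURCE A (Python) =====
-- def get_list_odd_value_task01_v5(max_count=10):
--     arr_odd = [0]*max_count
--     x = 0
--     count_odd = 0
--     while count_odd<max_count:
--         if x%2 == 1:
--             arr_odd[count_odd] = x
--             count_odd+=1
--         x+=1
--     return arr_odd
-- ===== SOURCE B (Python) =====
-- def get_list_odd_value_task01_v5(max_count=10):
--     return [2 * i + 1 for i in range(max_count)]
-- ===== Notes on version B (the rewrite author's own statement) =====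
-- stated objective: idiomatic
-- what changed: B maps each index directly to its odd number by the closed form instead of scanning all integers, testing parity and writing hits into a preallocated array.
import Mathlib
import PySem

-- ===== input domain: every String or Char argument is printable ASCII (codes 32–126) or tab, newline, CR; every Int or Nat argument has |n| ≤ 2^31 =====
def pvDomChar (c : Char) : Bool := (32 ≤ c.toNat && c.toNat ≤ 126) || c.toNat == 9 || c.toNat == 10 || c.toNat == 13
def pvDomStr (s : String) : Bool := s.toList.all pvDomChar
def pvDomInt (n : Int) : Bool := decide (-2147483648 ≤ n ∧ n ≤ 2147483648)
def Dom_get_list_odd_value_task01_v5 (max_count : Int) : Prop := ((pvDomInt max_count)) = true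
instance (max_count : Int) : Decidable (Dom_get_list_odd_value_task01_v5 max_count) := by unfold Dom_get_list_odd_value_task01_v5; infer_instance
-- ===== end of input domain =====

-- B computes each odd number by the closed form 2*i+1 instead of A's scan-and-filter loop; return values proved equal.

-- ===== PORT A =====
-- while count_odd < max_count: if x % 2 == 1 write x at arr[count_odd], count_odd += 1; x += 1.
-- The fuel argument only makes the loop total: 2*max_count steps always suffice (x never exceeds
-- 2*max_count), so fuel never runs out on the path the Python takes.
-- arr_odd[count_odd] = x is List.set; Lean's x % 2 agrees with Python's % for the positive modulus 2.
def pvLoopA (max_count : Int) : List Int → Int → Int → Nat → List Int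
  | arr, _, _, 0 => arr
  | arr, x, count_odd, fuel + 1 =>
    if count_odd < max_count then
      if x % 2 == 1 then
        pvLoopA max_count (arr.set count_odd.toNat x) (x + 1) (count_odd + 1) fuel
      else
        pvLoopA max_count arr (x + 1) count_odd fuel
    else arr

def get_list_odd_value_task01_v5 (max_count : Int) : List Int :=
  pvLoopA max_count (List.replicate max_count.toNat 0) 0 0 (2 * max_count).toNat

-- ===== PORT B =====
-- return [2*i + 1 for i in range(max_count)]
def get_list_odd_value_task01_v5_alt (max_count : Int) : List Int :=
  (PySem.List.pyRange 0 max_count 1).map (fun i => 2 * i + 1)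

-- ===== PRECONDITION & SPEC =====
def Spec_get_list_odd_value_task01_v5 (max_count : Int) (out : List Int) : Prop := out = get_list_odd_value_task01_v5_alt max_count
instance (max_count : Int) (out : List Int) : Decidable (Spec_get_list_odd_value_task01_v5 max_count out) := by unfold Spec_get_list_odd_value_task01_v5; infer_instance

-- ===== CLAIM (what is proved, stated in full; the proofs are below) =====
def Claim_equal_get_list_odd_value_task01_v5 : Prop := ∀ (max_count : Int), Dom_get_list_odd_value_task01_v5 max_count → Spec_get_list_odd_value_task01_v5 max_count (get_list_odd_value_task01_v5 max_count)

-- ===== LEMMAS AND PROOFS =====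

-- Loop invariant: at a state with count_odd = c (0 ≤ c ≤ mc), x = 2*c and fuel 2*(mc - c)
-- (two ticks per remaining slot — exactly what the loop consumes), the loop keeps arr's
-- first c entries and fills the rest with the remaining odd numbers.
theorem pvLoopA_inv (mc : Int) : ∀ (n : Nat) (c : Int) (arr : List Int),
    0 ≤ c → c ≤ mc → arr.length = mc.toNat → (mc - c).toNat = n →
    pvLoopA mc arr (2 * c) c (2 * n) =
      arr.take c.toNat ++ (List.range n).map (fun i : Nat => 2 * (c + i) + 1) := by
  intro n
  induction n with
  | zero =>
    intro c arr h0 hle hlen hf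
    have hc : c = mc := by omega
    simp [pvLoopA, hc, List.take_of_length_le, hlen]
  | succ n ih =>
    intro c arr h0 hle hlen hf
    have hlt : c < mc := by omega
    have hm0 : ¬ ((2 * c) % 2 == 1) = true := by simp only [beq_iff_eq]; omega
    have hm1 : ((2 * c + 1) % 2 == 1) = true := by simp only [beq_iff_eq]; omega
    have hfuel : 2 * (n + 1) = (2 * n + 1) + 1 := by ring
    rw [hfuel, pvLoopA, if_pos hlt, if_neg hm0, pvLoopA, if_pos hlt, if_pos hm1]
    have h2c1 : 2 * c + 1 + 1 = 2 * (c + 1) := by ring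
    rw [h2c1]
    rw [ih (c + 1) (arr.set c.toNat (2 * c + 1)) (by omega) (by omega)
        (by simp [hlen]) (by omega)]
    have hclen : c.toNat < arr.length := by omega
    have htake : (arr.set c.toNat (2 * c + 1)).take (c + 1).toNat
        = arr.take c.toNat ++ [2 * c + 1] := by
      have h1 : (c + 1).toNat = c.toNat + 1 := by omega
      rw [h1, List.take_add_one]
      simp [List.take_set_of_le, hclen]
    rw [htake, List.append_assoc]
    congr 1
    rw [List.range_succ_eq_map, List.map_cons, List.map_map]
    simp only [List.singleton_append]
    congr 1
    · push_cast; ring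
    · apply List.map_congr_left
      intro i _
      simp only [Function.comp_apply]
      push_cast; ring

-- ===== VERDICT (by name: the statement is the Claim_ definition above) =====
theorem get_list_odd_value_task01_v5_spec : Claim_equal_get_list_odd_value_task01_v5 := by
  unfold Claim_equal_get_list_odd_value_task01_v5
  intro mc _
  unfold Spec_get_list_odd_value_task01_v5 get_list_odd_value_task01_v5 get_list_odd_value_task01_v5_alt
  by_cases h : 0 ≤ mc
  · have hfuel : (2 * mc).toNat = 2 * mc.toNat := by omega
    have := pvLoopA_inv mc mc.toNat 0 (List.replicate mc.toNat 0)
      le_rfl h (by simp) (by omega)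
    simp only [mul_zero] at this
    rw [hfuel, this, PySem.List.pyRange_one]
    simp
  · have hfuel : (2 * mc).toNat = 0 := by omega
    rw [hfuel, pvLoopA]
    simp [PySem.List.pyRange_one_eq_nil (by omega : mc ≤ 0)]
    omega
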